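-- pv_equiv track=rewrite | github.com/takushi-m/atcoder-work | contests/abc159/f.py | f
-- ===== SOURCE A (Python) =====
-- from itertools import combinations
--
-- def f(n,s,al):
--     res = 0
--     for l in range(n):
--         for r in range(l,n):
--             for k in range(1,r-l+1+1):
--                 for c in combinations(range(l,r+1),k):
--                     if s==sum([al[x] for x in c]):
--                         res += 1
--     return res
-- ===== SOURCE B (Python) =====
-- def f(n, s, al):
--     # Per left endpoint l, grow the window to the right while maintaining a
--     # dict of subset-sum counts; each step adds the count of nonempty subsets
--     # of al[l..r] summing to s (each counted once per window, as in the spec).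
--     res = 0
--     for l in range(n):
--         dp = {0: 1}  # subset sums of al[l..r], including the empty subset
--         for r in range(l, n):
--             a = al[r]
--             for t, w in list(dp.items()):
--                 dp[t + a] = dp.get(t + a, 0) + w
--             res += dp.get(s, 0) - (1 if s == 0 else 0)
--     return res
-- ===== Notes on version B (the rewrite author's own statement) =====
-- stated objective: alternative
-- what changed: A enumerates every subset of every interval (combinations for all l, r, k); B keeps, for each left endpoint, one growing-window subset-sum dictionary (knapsack-style DP) and reads off the count of subsets summing to s per window; intended as faster (measured 12-15x on small sizes) but on large random 32-bit values the dictionary of distinct subset sums itself grows exponentially, so a timing run did not confirm it at the largest sizes.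
import Mathlib
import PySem

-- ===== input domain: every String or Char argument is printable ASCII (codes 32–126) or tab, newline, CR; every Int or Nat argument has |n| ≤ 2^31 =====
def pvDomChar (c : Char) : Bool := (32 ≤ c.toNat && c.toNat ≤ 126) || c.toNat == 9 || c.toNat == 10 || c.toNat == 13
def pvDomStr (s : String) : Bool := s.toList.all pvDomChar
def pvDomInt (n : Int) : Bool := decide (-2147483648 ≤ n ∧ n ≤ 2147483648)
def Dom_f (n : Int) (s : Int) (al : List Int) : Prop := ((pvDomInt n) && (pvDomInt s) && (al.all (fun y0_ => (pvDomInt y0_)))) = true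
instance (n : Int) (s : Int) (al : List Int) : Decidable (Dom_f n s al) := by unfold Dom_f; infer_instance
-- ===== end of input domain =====

-- B replaces A's enumeration of every subset of every interval by, for each left
-- endpoint, one growing-window subset-sum dictionary (a knapsack-style DP).

-- ===== PORT A =====
-- literal transliteration of A; al[x] is pyGetD (exact: Pre_f keeps every index in range);
-- k comes from range(1, r-l+2), so k ≥ 1 and k.toNat is exact
def f (n : Int) (s : Int) (al : List Int) : Int :=
  (PySem.List.pyRange 0 n 1).foldl (fun res l =>
    (PySem.List.pyRange l n 1).foldl (fun res r =>
      (PySem.List.pyRange 1 (r - l + 1 + 1) 1).foldl (fun res k =>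
        (PySem.List.combinations (PySem.List.pyRange l (r + 1) 1) k.toNat).foldl (fun res c =>
          if s = (c.map (fun x => PySem.List.pyGetD al x 0)).sum then res + 1 else res)
          res) res) res) 0

-- ===== PORT B =====
-- transliteration of Source B: res and dp thread through the r loop as a pair;
-- the 'for t, w in list(dp.items())' snapshot loop is a foldl over dp.items
def f_alt (n : Int) (s : Int) (al : List Int) : Int :=
  (PySem.List.pyRange 0 n 1).foldl (fun res l =>
    ((PySem.List.pyRange l n 1).foldl
      (fun (st : Int × PySem.Dict Int Int) r =>
        let a := PySem.List.pyGetD al r 0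
        let dp := st.2.items.foldl
          (fun d tw => d.insert (tw.1 + a) (d.getD (tw.1 + a) 0 + tw.2)) st.2
        (st.1 + (dp.getD s 0 - (if s = 0 then 1 else 0)), dp))
      (res, PySem.Dict.empty.insert 0 1)).1) 0

-- ===== PRECONDITION & SPEC =====
-- Pre_f excludes exactly the inputs on which the Python A raises IndexError:
-- whenever al has fewer than n elements, A indexes al[len(al)] out of range.
def Pre_f (n : Int) (s : Int) (al : List Int) : Prop := n ≤ (al.length : Int)
instance (n : Int) (s : Int) (al : List Int) : Decidable (Pre_f n s al) := by
  unfold Pre_f; infer_instance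
def pvWitness_f : Int × Int × List Int := (3, 3, [1, 2, 3])

def Spec_f (n : Int) (s : Int) (al : List Int) (out : Int) : Prop := out = f_alt n s al
instance (n : Int) (s : Int) (al : List Int) (out : Int) : Decidable (Spec_f n s al out) := by
  unfold Spec_f; infer_instance

-- ===== CLAIM (what is proved, stated in full; the proofs are below) =====
def Claim_equal_f : Prop := ∀ (n : Int) (s : Int) (al : List Int),
  Dom_f n s al → Pre_f n s al → Spec_f n s al (f n s al)

-- ===== LEMMAS AND PROOFS =====

-- the value of index x, as both ports read it
def gval (al : List Int) (x : Int) : Int := PySem.List.pyGetD al x 0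

-- the values al[l..j-1]
def valsTo (al : List Int) (l j : Int) : List Int :=
  (PySem.List.pyRange l j 1).map (gval al)

-- number of subsets (including the empty one) of xs with sum t
def subsCount : List Int → Int → Int
  | [], t => if t = 0 then 1 else 0
  | x :: xs, t => subsCount xs t + subsCount xs (t - x)

-- what both programs add for the window [l, r]: nonempty subsets of al[l..r] summing to s
def termLR (al : List Int) (s l r : Int) : Int :=
  subsCount (valsTo al l (r + 1)) s - (if s = 0 then 1 else 0)

lemma pyRange_nil {a b : Int} (h : b ≤ a) : PySem.List.pyRange a b 1 = [] := by
  rw [PySem.List.pyRange_one]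
  have : (b - a).toNat = 0 := by omega
  simp [this]

lemma subsCount_append_singleton (xs : List Int) (a t : Int) :
    subsCount (xs ++ [a]) t = subsCount xs t + subsCount xs (t - a) := by
  induction xs generalizing t with
  | nil => simp [subsCount]
  | cons x xs ih =>
      have h : t - x - a = t - a - x := by ring
      simp only [List.cons_append, subsCount, ih, h]
      ring

lemma sum_range_shift (G : Nat → Int) (m : Nat) :
    ((List.range (m + 1)).map G).sum = G 0 + ((List.range m).map (fun j => G (j + 1))).sum := by
  rw [List.range_succ_eq_map]
  simp [List.map_map, Function.comp_def, Nat.succ_eq_add_one]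

lemma cnt0_eq (zs : List Int) (t : Int) :
    ((PySem.List.combinations zs 0).countP (fun c => decide (t = c.sum)) : Int)
    = if t = 0 then 1 else 0 := by
  by_cases h : t = 0 <;>
    simp [PySem.List.combinations_zero, List.countP, List.countP.go, h]

-- A-side: summing the k-combination counts over all sizes k gives subsCount
lemma sum_countP_combinations (ys : List Int) (t : Int) :
    ((List.range (ys.length + 1)).map
      (fun k => ((PySem.List.combinations ys k).countP (fun c => decide (t = c.sum)) : Int))).sum
    = subsCount ys t := by
  induction ys generalizing t with
  | nil =>
      by_cases h : t = 0 <;>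
        simp [subsCount, PySem.List.combinations_zero, List.countP, List.countP.go, h]
  | cons x xs ih =>
      have hcnt0 : ∀ (zs : List Int),
          ((PySem.List.combinations zs 0).countP (fun c => decide (t = c.sum)) : Int)
          = if t = 0 then 1 else 0 := fun zs => cnt0_eq zs t
      have hsucc : ∀ k : Nat,
          ((PySem.List.combinations (x :: xs) (k + 1)).countP (fun c => decide (t = c.sum)) : Int)
          = ((PySem.List.combinations xs k).countP (fun c => decide (t - x = c.sum)) : Int)
            + ((PySem.List.combinations xs (k + 1)).countP (fun c => decide (t = c.sum)) : Int) := by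
        intro k
        rw [PySem.List.combinations_cons_succ, List.countP_append]
        have hmap : ((PySem.List.combinations xs k).map (x :: ·)).countP
            (fun c => decide (t = c.sum))
            = (PySem.List.combinations xs k).countP (fun c => decide (t - x = c.sum)) := by
          rw [List.countP_map]
          apply List.countP_congr
          intro c _
          simp only [Function.comp_apply, List.sum_cons, decide_eq_true_eq]
          constructor <;> (intro h; omega)
        rw [hmap]
        push_cast
        ring
      have htail : ((List.range (xs.length + 1)).map
            (fun k => ((PySem.List.combinations xs (k + 1)).countP (fun c => decide (t = c.sum)) : Int))).sum
          = subsCount xs t - (if t = 0 then 1 else 0) := by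
        have h2 : ((List.range (xs.length + 1 + 1)).map
              (fun k => ((PySem.List.combinations xs k).countP (fun c => decide (t = c.sum)) : Int))).sum
            = subsCount xs t := by
          rw [List.range_succ, List.map_append, List.sum_append]
          simp only [List.map_cons, List.map_nil, List.sum_cons, List.sum_nil]
          rw [PySem.List.combinations_eq_nil_of_length_lt xs (Nat.lt_succ_self xs.length)]
          simpa using ih t
        rw [List.range_succ_eq_map] at h2
        simp only [List.map_cons, List.map_map, List.sum_cons] at h2
        rw [hcnt0 xs] at h2
        have h3 := h2
        rw [show (fun k => ((PySem.List.combinations xs k).countP (fun c => decide (t = c.sum)) : Int)) ∘ Nat.succ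
              = (fun k => ((PySem.List.combinations xs (k + 1)).countP (fun c => decide (t = c.sum)) : Int)) from rfl] at h3
        omega
      calc ((List.range ((x :: xs).length + 1)).map
            (fun k => ((PySem.List.combinations (x :: xs) k).countP (fun c => decide (t = c.sum)) : Int))).sum
          = (if t = 0 then 1 else 0)
            + ((List.range (xs.length + 1)).map
                (fun k => ((PySem.List.combinations (x :: xs) (k + 1)).countP (fun c => decide (t = c.sum)) : Int))).sum := by
            rw [List.length_cons, List.range_succ_eq_map]
            simp only [List.map_cons, List.map_map, List.sum_cons]
            rw [hcnt0 (x :: xs)]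
            congr 1
        _ = subsCount (x :: xs) t := by
            have hsplit : ((List.range (xs.length + 1)).map
                (fun k => ((PySem.List.combinations (x :: xs) (k + 1)).countP (fun c => decide (t = c.sum)) : Int))).sum
              = ((List.range (xs.length + 1)).map
                  (fun k => ((PySem.List.combinations xs k).countP (fun c => decide (t - x = c.sum)) : Int))).sum
                + ((List.range (xs.length + 1)).map
                    (fun k => ((PySem.List.combinations xs (k + 1)).countP (fun c => decide (t = c.sum)) : Int))).sum := by
              rw [← PySem.List.sum_map_add_int]
              apply congrArg
              apply List.map_congr_left
              intro k _
              exact hsucc k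
            rw [hsplit, ih (t - x), htail, subsCount]
            ring

-- A's k-loop over one window [l, r] computes termLR
lemma A_inner (al : List Int) (s l r res0 : Int) (h : l ≤ r) :
    (PySem.List.pyRange 1 (r - l + 1 + 1) 1).foldl (fun res k =>
        (PySem.List.combinations (PySem.List.pyRange l (r + 1) 1) k.toNat).foldl (fun res c =>
          if s = (c.map (fun x => PySem.List.pyGetD al x 0)).sum then res + 1 else res)
          res) res0
    = res0 + termLR al s l r := by
  have hbody : ∀ (res k : Int),
      (PySem.List.combinations (PySem.List.pyRange l (r + 1) 1) k.toNat).foldl (fun res c =>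
          if s = (c.map (fun x => PySem.List.pyGetD al x 0)).sum then res + 1 else res) res
      = res + ((PySem.List.combinations (valsTo al l (r + 1)) k.toNat).countP
          (fun c => decide (s = c.sum)) : Int) := by
    intro res k
    rw [PySem.List.foldl_ite_add_one (p := fun c => s = (List.map (fun x => PySem.List.pyGetD al x 0) c).sum)]
    congr 1
    rw [valsTo, PySem.List.combinations_map, List.countP_map]
    rfl
  rw [PySem.List.foldl_congr_mem _ _
        (fun res k => res + ((PySem.List.combinations (valsTo al l (r + 1)) k.toNat).countP
          (fun c => decide (s = c.sum)) : Int)) res0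
        (fun acc x _ => hbody acc x)]
  rw [PySem.List.foldl_add]
  congr 1
  have hm : (valsTo al l (r + 1)).length = (r - l + 1).toNat := by
    simp [valsTo, PySem.List.length_pyRange_one]
    omega
  set G : Nat → Int := fun k => ((PySem.List.combinations (valsTo al l (r + 1)) k).countP
      (fun c => decide (s = c.sum)) : Int) with hG
  have hmap : (PySem.List.pyRange 1 (r - l + 1 + 1) 1).map
        (fun k => ((PySem.List.combinations (valsTo al l (r + 1)) k.toNat).countP
          (fun c => decide (s = c.sum)) : Int))
      = (List.range (r - l + 1).toNat).map (fun j => G (j + 1)) := by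
    rw [PySem.List.pyRange_one, List.map_map]
    have hr : (r - l + 1 + 1 - 1 : Int) = r - l + 1 := by ring
    rw [hr]
    apply List.map_congr_left
    intro j _
    have : ((1 : Int) + (j : Int)).toNat = j + 1 := by omega
    simp only [Function.comp_apply, this, hG]
  rw [hmap]
  have hsum := sum_countP_combinations (valsTo al l (r + 1)) s
  rw [hm] at hsum
  have hshift := sum_range_shift G ((r - l + 1).toNat)
  rw [hsum] at hshift
  have h0 : G 0 = if s = 0 then 1 else 0 := cnt0_eq _ _
  rw [termLR, hshift, h0]
  ring

-- A equals the double sum of termLR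
lemma A_eq (n s : Int) (al : List Int) :
    f n s al
    = ((PySem.List.pyRange 0 n 1).map
        (fun l => ((PySem.List.pyRange l n 1).map (fun r => termLR al s l r)).sum)).sum := by
  rw [f]
  have houter : ∀ (res l : Int), l ∈ PySem.List.pyRange 0 n 1 →
      (PySem.List.pyRange l n 1).foldl (fun res r =>
        (PySem.List.pyRange 1 (r - l + 1 + 1) 1).foldl (fun res k =>
          (PySem.List.combinations (PySem.List.pyRange l (r + 1) 1) k.toNat).foldl (fun res c =>
            if s = (c.map (fun x => PySem.List.pyGetD al x 0)).sum then res + 1 else res)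
            res) res) res
      = res + ((PySem.List.pyRange l n 1).map (fun r => termLR al s l r)).sum := by
    intro res l _
    rw [PySem.List.foldl_congr_mem _ _ (fun res r => res + termLR al s l r) res
          (fun acc r hr => A_inner al s l r acc (PySem.List.mem_pyRange_one.mp hr).1)]
    rw [PySem.List.foldl_add]
  rw [PySem.List.foldl_congr_mem _ _
        (fun res l => res + ((PySem.List.pyRange l n 1).map (fun r => termLR al s l r)).sum) 0
        (fun acc l hl => houter acc l hl)]
  rw [PySem.List.foldl_add]
  simp

-- the snapshot loop 'for t, w in list(dp.items()): dp[t+a] = dp.get(t+a, 0) + w'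
lemma foldl_insert_getD (L : List (Int × Int)) (d : PySem.Dict Int Int) (a u : Int) :
    (L.foldl (fun d tw => d.insert (tw.1 + a) (d.getD (tw.1 + a) 0 + tw.2)) d).getD u 0
    = d.getD u 0 + ((L.filter (fun tw => tw.1 + a == u)).map (·.2)).sum := by
  induction L generalizing d with
  | nil => simp
  | cons tw L ih =>
      simp only [List.foldl_cons, ih, List.filter_cons]
      by_cases h : tw.1 + a = u
      · simp [h]
        ring
      · have hb : (tw.1 + a == u) = false := by simpa using h
        have hne : u ≠ tw.1 + a := fun he => h he.symm
        simp [hb, PySem.Dict.getD_insert, hne]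

lemma filter_items_sum (L : List (Int × Int)) (hnd : (L.map Prod.fst).Nodup) (k : Int) :
    ((L.filter (fun tw => tw.1 == k)).map (·.2)).sum = (PySem.Dict.mk L).getD k 0 := by
  induction L with
  | nil => simp [PySem.Dict.getD_eq_get?_getD, PySem.Dict.get?]
  | cons tw L ih =>
      simp only [List.map_cons, List.nodup_cons] at hnd
      rw [PySem.Dict.getD_eq_get?_getD]
      rcases tw with ⟨t, w⟩
      rw [PySem.Dict.get?_mk_cons]
      by_cases h : t = k
      · subst h
        have hf : L.filter (fun tw => tw.1 == t) = [] := by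
          apply List.filter_eq_nil_iff.mpr
          intro tw htw hbeq
          have h1 : tw.1 = t := by simpa using hbeq
          have h2 : t ∈ L.map Prod.fst := by
            rw [← h1]; exact List.mem_map_of_mem htw
          exact hnd.1 h2
        simp [hf]
      · have hb : (t == k) = false := by simpa using h
        simp only [List.filter_cons, hb, Bool.false_eq_true, ite_false]
        rw [ih hnd.2, PySem.Dict.getD_eq_get?_getD]

-- one snapshot-update pass adds the distribution shifted by a
lemma dict_step (d : PySem.Dict Int Int) (hnd : d.keys.Nodup) (a u : Int) :
    (d.items.foldl (fun dd tw => dd.insert (tw.1 + a) (dd.getD (tw.1 + a) 0 + tw.2)) d).getD u 0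
    = d.getD u 0 + d.getD (u - a) 0 := by
  rw [foldl_insert_getD]
  congr 1
  have hf : d.items.filter (fun tw => tw.1 + a == u) = d.items.filter (fun tw => tw.1 == u - a) := by
    apply List.filter_congr
    intro tw _
    by_cases h : tw.1 + a = u
    · simp [show tw.1 = u - a by omega]
    · simp [h, show tw.1 ≠ u - a by omega]
  rw [hf, filter_items_sum d.items hnd (u - a)]

-- B's r-loop invariant: dp holds the subset-sum distribution of al[l..r]
lemma B_loop (s n : Int) (al : List Int) (l : Int) (m : Nat) :
    ∀ (j res0 : Int) (d : PySem.Dict Int Int),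
    (n - j).toNat = m → l ≤ j → d.keys.Nodup →
    (∀ u, d.getD u 0 = subsCount (valsTo al l j) u) →
    ((PySem.List.pyRange j n 1).foldl
      (fun (st : Int × PySem.Dict Int Int) r =>
        let a := PySem.List.pyGetD al r 0
        let dp := st.2.items.foldl
          (fun d tw => d.insert (tw.1 + a) (d.getD (tw.1 + a) 0 + tw.2)) st.2
        (st.1 + (dp.getD s 0 - (if s = 0 then 1 else 0)), dp))
      (res0, d)).1
    = res0 + ((PySem.List.pyRange j n 1).map (fun r => termLR al s l r)).sum := by
  induction m with
  | zero =>
      intro j res0 d hm _ _ _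
      rw [pyRange_nil (by omega : n ≤ j)]
      simp
  | succ m ih =>
      intro j res0 d hm hlj hnd hd
      have hjn : j < n := by omega
      rw [PySem.List.pyRange_one_cons hjn]
      rw [List.foldl_cons, List.map_cons, List.sum_cons]
      set a := PySem.List.pyGetD al j 0 with ha
      set d' := d.items.foldl
          (fun d tw => d.insert (tw.1 + a) (d.getD (tw.1 + a) 0 + tw.2)) d with hd'
      have hvals : valsTo al l (j + 1) = valsTo al l j ++ [a] := by
        rw [valsTo, PySem.List.pyRange_one_succ_right hlj, List.map_append]
        rfl
      have hd'u : ∀ u, d'.getD u 0 = subsCount (valsTo al l (j + 1)) u := by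
        intro u
        rw [hd', dict_step d hnd a u, hd u, hd (u - a), hvals,
            subsCount_append_singleton]
      have hnd' : d'.keys.Nodup :=
        PySem.Dict.nodup_keys_foldl_insert_key d.items (fun tw => tw.1 + a)
          (fun dd tw => dd.getD (tw.1 + a) 0 + tw.2) d hnd
      have hstep := ih (j + 1) (res0 + (d'.getD s 0 - (if s = 0 then 1 else 0))) d'
          (by omega) (by omega) hnd' hd'u
      simp only at hstep ⊢
      rw [hstep, hd'u s, termLR]
      ring

-- B equals the same double sum of termLR
lemma B_eq (n s : Int) (al : List Int) :
    f_alt n s al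
    = ((PySem.List.pyRange 0 n 1).map
        (fun l => ((PySem.List.pyRange l n 1).map (fun r => termLR al s l r)).sum)).sum := by
  rw [f_alt]
  have houter : ∀ (res l : Int), l ∈ PySem.List.pyRange 0 n 1 →
      ((PySem.List.pyRange l n 1).foldl
        (fun (st : Int × PySem.Dict Int Int) r =>
          let a := PySem.List.pyGetD al r 0
          let dp := st.2.items.foldl
            (fun d tw => d.insert (tw.1 + a) (d.getD (tw.1 + a) 0 + tw.2)) st.2
          (st.1 + (dp.getD s 0 - (if s = 0 then 1 else 0)), dp))
        (res, PySem.Dict.empty.insert 0 1)).1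
      = res + ((PySem.List.pyRange l n 1).map (fun r => termLR al s l r)).sum := by
    intro res l _
    apply B_loop s n al l ((n - l).toNat) l res _ rfl le_rfl
    · exact PySem.Dict.nodup_keys_insert PySem.Dict.empty 0 1 PySem.Dict.nodup_keys_empty
    · intro u
      have hnil : valsTo al l l = [] := by
        rw [valsTo, pyRange_nil le_rfl]; rfl
      rw [hnil, PySem.Dict.getD_insert, subsCount]
      by_cases h : u = 0 <;> simp [h]
  rw [PySem.List.foldl_congr_mem _ _
        (fun res l => res + ((PySem.List.pyRange l n 1).map (fun r => termLR al s l r)).sum) 0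
        (fun acc l hl => houter acc l hl)]
  rw [PySem.List.foldl_add]
  simp

-- ===== VERDICT (by name: the statement is the Claim_ definition above) =====
theorem f_spec : Claim_equal_f := by
  intro n s al _ _
  unfold Spec_f
  rw [A_eq, B_eq]
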